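-- pv_equiv track=rewrite | github.com/tcdude/oneironautics | gamelib/util.py | _add_shader_defines
-- ===== SOURCE A (Python) =====
-- def _add_shader_defines(shaderstr, defines):
--     shaderlines = shaderstr.split('\n')
--
--     for line in shaderlines:
--         if '#version' in line:
--             version_line = line
--             break
--     else:
--         raise RuntimeError('Failed to find GLSL version string')
--     shaderlines.remove(version_line)
--
--
--     define_lines = [
--         f'#define {define} {value}'
--         for define, value in defines.items()
--     ]
--
--     return '\n'.join(
--         [version_line]
--         + define_lines
--         + ['#line 1']
--         + shaderlines
--     )
-- ===== SOURCE B (Python) =====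
-- def _add_shader_defines(shaderstr, defines):
--     # Work on the raw string with index arithmetic instead of a line list:
--     # locate the first '#version' occurrence, cut out its line by slicing,
--     # and stitch the result together by concatenation.
--     i = shaderstr.find('#version')
--     if i < 0:
--         raise RuntimeError('Failed to find GLSL version string')
--     start = shaderstr.rfind('\n', 0, i) + 1
--     end = shaderstr.find('\n', i)
--     if end < 0:
--         version_line = shaderstr[start:]
--         tail = '' if start == 0 else '\n' + shaderstr[:start - 1]
--     else:
--         version_line = shaderstr[start:end]
--         tail = '\n' + shaderstr[:start] + shaderstr[end + 1:]
--     body = ''.join(f'\n#define {d} {v}' for d, v in defines.items())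
--     return version_line + body + '\n#line 1' + tail
-- ===== Notes on version B (the rewrite author's own statement) =====
-- stated objective: alternative
-- what changed: B never builds a line list: it locates the first '#version' occurrence with str.find, finds the enclosing line's boundaries with rfind/find, and stitches the result together from raw-string slices, whereas A splits into lines, scans them, removes the matched line and re-joins.
import Mathlib
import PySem

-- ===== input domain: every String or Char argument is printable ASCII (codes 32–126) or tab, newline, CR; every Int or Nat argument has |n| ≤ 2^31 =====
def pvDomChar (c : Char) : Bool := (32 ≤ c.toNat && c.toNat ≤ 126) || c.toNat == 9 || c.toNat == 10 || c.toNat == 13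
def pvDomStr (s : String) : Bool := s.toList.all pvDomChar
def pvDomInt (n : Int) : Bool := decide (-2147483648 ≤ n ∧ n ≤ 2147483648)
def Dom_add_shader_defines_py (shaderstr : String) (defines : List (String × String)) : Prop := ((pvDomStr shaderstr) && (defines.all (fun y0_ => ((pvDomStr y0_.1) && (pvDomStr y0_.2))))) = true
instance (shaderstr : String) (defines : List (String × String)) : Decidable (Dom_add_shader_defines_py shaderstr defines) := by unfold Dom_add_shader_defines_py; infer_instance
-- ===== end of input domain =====

-- B replaces A's line-list processing (split, scan-for-match, list.remove, join) by raw-string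
-- index arithmetic: find/rfind locate the version line's boundaries and the result is stitched
-- from string slices; objective: alternative (different data representation, similar cost).

-- ===== PORT A =====
-- for-line-with-break = first line containing '#version'; then list.remove of that line.
-- s.split('\n') has a nonempty literal separator, so split? is always some; getD [] is never taken.
def add_shader_defines_py (shaderstr : String) (defines : List (String × String)) : String :=
  let shaderlines := (PySem.Str.split? shaderstr "\n").getD []
  match shaderlines.find? (fun line => PySem.Str.isIn "#version" line) with
  | none => ""  -- RuntimeError: excluded by Pre_
  | some version_line =>
    let shaderlines := (PySem.List.remove? shaderlines version_line).getD shaderlines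
    let define_lines := (PySem.Dict.ofList defines).items.map
      (fun p => "#define " ++ p.1 ++ " " ++ p.2)
    PySem.Str.join "\n" ([version_line] ++ define_lines ++ ["#line 1"] ++ shaderlines)

-- ===== PORT B =====
-- Source B: i = s.find('#version'); start = s.rfind('\n', 0, i) + 1; end = s.find('\n', i);
-- the version line and the remainder are cut out of the raw string by slicing.
def add_shader_defines_py_alt (shaderstr : String) (defines : List (String × String)) : String :=
  let i := PySem.Str.find shaderstr "#version"
  if i < 0 then ""  -- RuntimeError: excluded by Pre_
  else
    let start := PySem.Str.rfindFrom shaderstr "\n" 0 (some i) + 1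
    let endi := PySem.Str.findFrom shaderstr "\n" i
    let vt : String × String :=
      if endi < 0 then
        (PySem.Str.slice shaderstr (some start) none,
         if start = 0 then "" else "\n" ++ PySem.Str.slice shaderstr none (some (start - 1)))
      else
        (PySem.Str.slice shaderstr (some start) (some endi),
         "\n" ++ PySem.Str.slice shaderstr none (some start)
             ++ PySem.Str.slice shaderstr (some (endi + 1)) none)
    let body := PySem.Str.join "" ((PySem.Dict.ofList defines).items.map
      (fun p => "\n#define " ++ p.1 ++ " " ++ p.2))
    vt.1 ++ body ++ "\n#line 1" ++ vt.2

-- ===== PRECONDITION & SPEC =====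
-- Pre_ excludes exactly the inputs where no line contains '#version': there A (and B) raise RuntimeError.
def Pre_add_shader_defines_py (shaderstr : String) (defines : List (String × String)) : Prop :=
  ∃ line ∈ (PySem.Str.split? shaderstr "\n").getD [], PySem.Str.isIn "#version" line = true
instance (shaderstr : String) (defines : List (String × String)) : Decidable (Pre_add_shader_defines_py shaderstr defines) := by unfold Pre_add_shader_defines_py; infer_instance
def pvWitness_add_shader_defines_py : String × (List (String × String)) := ("#version 330\nvoid main(){}", [("A", "1")])

def Spec_add_shader_defines_py (shaderstr : String) (defines : List (String × String)) (out : String) : Prop := out = add_shader_defines_py_alt shaderstr defines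
instance (shaderstr : String) (defines : List (String × String)) (out : String) : Decidable (Spec_add_shader_defines_py shaderstr defines out) := by unfold Spec_add_shader_defines_py; infer_instance

-- ===== CLAIM (what is proved, stated in full; the proofs are below) =====
def Claim_equal_add_shader_defines_py : Prop := ∀ (shaderstr : String) (defines : List (String × String)), Dom_add_shader_defines_py shaderstr defines → Pre_add_shader_defines_py shaderstr defines → Spec_add_shader_defines_py shaderstr defines (add_shader_defines_py shaderstr defines)

-- ===== LEMMAS AND PROOFS =====
def pvSplit (s : List Char) : List (List Char) :=
  match s with
  | [] => [[]]
  | a :: t => if a = '\n' then [] :: pvSplit t else ((a :: (pvSplit t).headI) :: (pvSplit t).tail)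

theorem pvSplit_ne_nil (s : List Char) : pvSplit s ≠ [] := by
  cases s with
  | nil => simp [pvSplit]
  | cons a t => by_cases h : a = '\n' <;> simp [pvSplit, h]


theorem pvSplit_cons_nl (t : List Char) : pvSplit ('\n' :: t) = [] :: pvSplit t := by
  simp [pvSplit]

theorem pvSplit_cons_ne (a : Char) (t : List Char) (h : a ≠ '\n') :
    pvSplit (a :: t) = (a :: (pvSplit t).headI) :: (pvSplit t).tail := by
  simp [pvSplit, h]

theorem pvGo (fuel : Nat) (l cur : List Char) (acc : List (List Char)) (h : l.length < fuel) :
    PySem.Chars.splitOn.go ['\n'] fuel l cur acc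
      = acc.reverse ++ ((pvSplit l).modifyHead (cur.reverse ++ ·)) := by
  induction fuel generalizing l cur acc with
  | zero => omega
  | succ f ih =>
    cases l with
    | nil =>
      rw [PySem.Chars.splitOn.go]
      simp [pvSplit]
      omega
    | cons a t =>
      rw [PySem.Chars.splitOn.go]
      by_cases ha : a = '\n'
      · subst ha
        have hp : List.isPrefixOf ['\n'] ('\n' :: t) = true := by simp [List.isPrefixOf]
        simp only [hp, if_true]
        rw [ih _ _ _ (by simpa using Nat.lt_of_succ_lt_succ (Nat.lt_of_lt_of_le h (le_refl _)))]
        simp [pvSplit]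
        cases pvSplit t <;> simp
      · have hp : List.isPrefixOf ['\n'] (a :: t) = false := by
          simp [List.isPrefixOf]; exact fun hc => ha hc.symm
        simp only [hp, Bool.false_eq_true, if_false]
        rw [ih _ _ _ (by simpa using h)]
        have hne := pvSplit_ne_nil t
        cases hs : pvSplit t with
        | nil => exact absurd hs hne
        | cons u us => simp [pvSplit, ha, hs]

theorem pvSplitOn_eq (s : List Char) : PySem.Chars.splitOn s ['\n'] = pvSplit s := by
  rw [PySem.Chars.splitOn, pvGo _ _ _ _ (by omega)]
  cases hs : pvSplit s <;> simp

-- join over '\n' of a nonempty list, in flatten form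
theorem pvJoin_cons (x : List Char) (rest : List (List Char)) :
    PySem.Chars.join ['\n'] (x :: rest) = x ++ (rest.map (fun r => '\n' :: r)).flatten := by
  induction rest generalizing x with
  | nil => simp [PySem.Chars.join_singleton]
  | cons y ys ih => rw [PySem.Chars.join_cons_cons, ih y]; simp

theorem pvJoin_pvSplit (s : List Char) : PySem.Chars.join ['\n'] (pvSplit s) = s := by
  induction s with
  | nil => simp [pvSplit, PySem.Chars.join_singleton]
  | cons a t ih =>
    by_cases ha : a = '\n'
    · subst ha
      rw [pvSplit_cons_nl]
      cases hs : pvSplit t with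
      | nil => exact absurd hs (pvSplit_ne_nil t)
      | cons u us =>
        rw [PySem.Chars.join_cons_cons]
        rw [hs] at ih; rw [ih]; simp
    · rw [pvSplit_cons_ne a t ha]
      cases hs : pvSplit t with
      | nil => exact absurd hs (pvSplit_ne_nil t)
      | cons u us =>
        rw [hs] at ih
        rw [pvJoin_cons] at ih ⊢
        simp at ih ⊢
        simpa using ih

theorem pvSplit_nl_free (s : List Char) : ∀ l ∈ pvSplit s, '\n' ∉ l := by
  induction s with
  | nil => simp [pvSplit]
  | cons a t ih =>
    by_cases ha : a = '\n'
    · subst ha; rw [pvSplit_cons_nl]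
      intro l hl
      rcases List.mem_cons.mp hl with rfl | h
      · simp
      · exact ih l h
    · rw [pvSplit_cons_ne a t ha]
      cases hs : pvSplit t with
      | nil => exact absurd hs (pvSplit_ne_nil t)
      | cons u us =>
        intro l hl
        rcases List.mem_cons.mp hl with rfl | h
        · intro hc
          rcases List.mem_cons.mp hc with hc | hc
          · exact ha hc.symm
          · exact ih u (by simp [hs]) (by simpa [hs] using hc)
        · exact ih l (by simp only [hs]; exact List.mem_cons_of_mem _ (by simpa using h))

-- find l sub = k when k is an occurrence and none earlier
theorem pvFind_eq_of (l sub : List Char) (k : Nat) (h1 : sub <+: List.drop k l)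
    (h2 : ∀ j < k, ¬ sub <+: List.drop j l) : PySem.Chars.find l sub = (k : Int) := by
  have hinf : sub <:+: l := (List.IsPrefix.isInfix h1).trans (List.IsSuffix.isInfix (List.drop_suffix k l))
  have hnn : 0 ≤ PySem.Chars.find l sub := (PySem.Chars.find_nonneg_iff l sub).mpr hinf
  obtain ⟨hocc, hmin⟩ := PySem.Chars.find_spec hnn
  rcases Nat.lt_trichotomy (PySem.Chars.find l sub).toNat k with hlt | heq | hgt
  · exact absurd hocc (h2 _ hlt)
  · omega
  · exact absurd h1 (hmin k hgt)

theorem pvRfind_go_eq (l sub : List Char) (k j : Nat) (hkj : k ≤ j)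
    (h1 : sub <+: List.drop k l) (h2 : ∀ m, k < m → m ≤ j → ¬ sub <+: List.drop m l) :
    PySem.Chars.rfind.go l sub j = (k : Int) := by
  induction j with
  | zero =>
    have hk0 : k = 0 := Nat.le_zero.mp hkj
    subst hk0
    rw [PySem.Chars.rfind.go]
    simp only [List.drop_zero] at h1
    simp [List.isPrefixOf_iff_prefix.mpr h1]
  | succ j ih =>
    by_cases hk : k = j + 1
    · subst hk
      rw [PySem.Chars.rfind.go]
      simp [List.isPrefixOf_iff_prefix.mpr h1]
    · have hkle : k ≤ j := by omega
      rw [PySem.Chars.rfind.go]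
      have hnp : List.isPrefixOf sub (List.drop (j+1) l) = false := by
        rw [Bool.eq_false_iff]
        intro hp
        exact h2 (j+1) (by omega) (le_refl _) (List.isPrefixOf_iff_prefix.mp hp)
      simp only [hnp, Bool.false_eq_true, if_false]
      exact ih hkle (fun m hm1 hm2 => h2 m hm1 (by omega))

theorem pvRfind_go_neg (l sub : List Char) (j : Nat)
    (h : ∀ m, m ≤ j → ¬ sub <+: List.drop m l) :
    PySem.Chars.rfind.go l sub j = -1 := by
  induction j with
  | zero =>
    rw [PySem.Chars.rfind.go]
    have := h 0 (le_refl _)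
    simp only [List.drop_zero] at this
    simp [List.isPrefixOf_iff_prefix, this]
  | succ j ih =>
    rw [PySem.Chars.rfind.go]
    have hnp : List.isPrefixOf sub (List.drop (j+1) l) = false := by
      rw [Bool.eq_false_iff]
      exact fun hp => h (j+1) (le_refl _) (List.isPrefixOf_iff_prefix.mp hp)
    simp only [hnp, Bool.false_eq_true, if_false]
    exact ih (fun m hm => h m (by omega))

-- an occurrence of a c-free pattern in x ++ c :: y lies in x or in y
theorem pvOcc_split (x y pat : List Char) (c : Char) (hc : c ∉ pat) (j : Nat)
    (h : pat <+: List.drop j (x ++ c :: y)) :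
    (j + pat.length ≤ x.length ∧ pat <+: List.drop j x) ∨
    (x.length + 1 ≤ j ∧ pat <+: List.drop (j - x.length - 1) y) := by
  by_cases hj : x.length + 1 ≤ j
  · right
    refine ⟨hj, ?_⟩
    have : List.drop j (x ++ c :: y) = List.drop (j - x.length - 1) y := by
      rw [List.drop_append]
      rw [List.drop_of_length_le (by omega)]
      have : j - x.length = (j - x.length - 1) + 1 := by omega
      rw [this]
      simp
    rwa [this] at h
  · have hjx : j ≤ x.length := by omega
    rw [List.drop_append_of_le_length hjx] at h
    by_cases hlen : j + pat.length ≤ x.length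
    · left
      refine ⟨hlen, ?_⟩
      have hle : pat.length ≤ (List.drop j x).length := by simp; omega
      rw [List.prefix_iff_eq_take] at h ⊢
      rwa [List.take_append_of_le_length hle] at h
    · exfalso
      have hlt : (List.drop j x).length < pat.length := by simp; omega
      have heq := List.prefix_iff_eq_take.mp h
      have hel : pat[(List.drop j x).length]? = some c := by
        rw [heq]
        rw [List.getElem?_take_of_lt hlt]
        rw [List.getElem?_append_right (le_refl _)]
        simp
      exact hc (List.mem_of_getElem? hel)

-- the prefix of the joined string contributed by the lines before the match
def pvPre (P : List (List Char)) : List Char := (P.map (fun l => l ++ ['\n'])).flatten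

theorem pvPre_nil : pvPre [] = [] := rfl

theorem pvPre_cons (q : List Char) (P : List (List Char)) :
    pvPre (q :: P) = q ++ '\n' :: pvPre P := by simp [pvPre]

theorem pvJoin_split (P L : List (List Char)) (hL : L ≠ []) :
    PySem.Chars.join ['\n'] (P ++ L) = pvPre P ++ PySem.Chars.join ['\n'] L := by
  induction P with
  | nil => simp [pvPre]
  | cons q P' ih =>
    cases hPL : P' ++ L with
    | nil => exact absurd (List.append_eq_nil_iff.mp hPL).2 hL
    | cons r rs =>
      rw [List.cons_append, hPL, PySem.Chars.join_cons_cons, ← hPL, ih, pvPre_cons]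
      simp

-- no occurrence of the pattern strictly before the pre-part plus the first occurrence in w
theorem pvNoOcc (P : List (List Char)) (w pat : List Char) (hnl : '\n' ∉ pat)
    (hP : ∀ l ∈ P, ¬ pat <:+: l) (k : Nat) (hk : ∀ j < k, ¬ pat <+: List.drop j w) :
    ∀ j < (pvPre P).length + k, ¬ pat <+: List.drop j (pvPre P ++ w) := by
  induction P with
  | nil => simpa [pvPre] using hk
  | cons q P' ih =>
    intro j hj hpre
    rw [pvPre_cons, List.append_assoc] at hpre
    have hsplit := pvOcc_split q (pvPre P' ++ w) pat '\n' hnl j (by simpa using hpre)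
    rcases hsplit with ⟨_, hocc⟩ | ⟨hge, hocc⟩
    · exact hP q (by simp) ((List.IsPrefix.isInfix hocc).trans (List.IsSuffix.isInfix (List.drop_suffix _ _)))
    · refine ih (fun l hl => hP l (by simp [hl])) (j - q.length - 1) ?_ hocc
      rw [pvPre_cons] at hj
      simp at hj
      omega

theorem pvSingle_no_prefix (x : List Char) (h : '\n' ∉ x) : ¬ ['\n'] <+: x :=
  fun hp => h (hp.subset (by simp))

theorem pvNoNl_no_prefix (a rest : List Char) (ha : '\n' ∉ a) (j : Nat) (hj : j < a.length) :
    ¬ ['\n'] <+: List.drop j (a ++ rest) := by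
  rw [List.drop_append_of_le_length (by omega), List.drop_eq_getElem_cons hj]
  rintro ⟨t, ht⟩
  simp only [List.cons_append] at ht
  have : a[j] = '\n' := (List.cons.injEq _ _ _ _ ▸ ht).1.symm
  exact ha (this ▸ List.getElem_mem hj)

-- C1: position of the first pattern occurrence in the joined string
theorem pvFind_s (P S : List (List Char)) (v pat : List Char)
    (hnl : '\n' ∉ pat) (hv : pat <:+: v)
    (hP : ∀ l ∈ P, ¬ pat <:+: l) :
    PySem.Chars.find (pvPre P ++ PySem.Chars.join ['\n'] (v :: S)) pat
      = ((pvPre P).length + (PySem.Chars.find v pat).toNat : Nat) := by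
  have hnn : 0 ≤ PySem.Chars.find v pat := (PySem.Chars.find_nonneg_iff v pat).mpr hv
  obtain ⟨hocc, hmin⟩ := PySem.Chars.find_spec hnn
  set fv := (PySem.Chars.find v pat).toNat with hfv
  have hfvle : fv + pat.length ≤ v.length := by
    have h1 : pat.length ≤ (List.drop fv v).length := hocc.length_le
    rw [List.length_drop] at h1
    have h2 : ((fv : Nat) : Int) = PySem.Chars.find v pat := Int.toNat_of_nonneg hnn
    have h3 := PySem.Chars.find_le_length v pat
    omega
  have hw : PySem.Chars.join ['\n'] (v :: S) = v ++ (S.map (fun r => '\n' :: r)).flatten :=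
    pvJoin_cons v S
  -- no occurrence before fv in the whole join
  have hkw : ∀ j < fv, ¬ pat <+: List.drop j (PySem.Chars.join ['\n'] (v :: S)) := by
    intro j hj hpre
    rw [hw] at hpre
    cases hS : S with
    | nil => simp [hS] at hpre; exact hmin j hj hpre
    | cons r rs =>
      rw [hS] at hpre
      simp only [List.map_cons, List.flatten_cons, List.cons_append] at hpre
      rw [show r ++ ((rs.map (fun r => '\n' :: r)).flatten) = r ++ (rs.map (fun r => '\n' :: r)).flatten from rfl] at hpre
      have := pvOcc_split v (r ++ (rs.map (fun r => '\n' :: r)).flatten) pat '\n' hnl j (by simpa using hpre)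
      rcases this with ⟨_, hocc'⟩ | ⟨hge, _⟩
      · exact hmin j hj hocc'
      · omega
  apply pvFind_eq_of
  · -- occurrence at preLen + fv
    rw [List.drop_append]
    rw [List.drop_of_length_le (by omega)]
    have : (pvPre P).length + fv - (pvPre P).length = fv := by omega
    rw [this, List.nil_append, hw, List.drop_append_of_le_length (by omega)]
    exact hocc.trans (List.prefix_append _ _)
  · exact pvNoOcc P _ pat hnl hP fv hkw

theorem pvPre_concat (P : List (List Char)) (h : P ≠ []) :
    ∃ B, pvPre P = B ++ ['\n'] := by
  induction P with
  | nil => exact absurd rfl h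
  | cons q P' ih =>
    cases hP' : P' with
    | nil => exact ⟨q, by simp [pvPre_cons, pvPre_nil]⟩
    | cons r rs =>
      obtain ⟨B', hB'⟩ := ih (by simp [hP'])
      exact ⟨q ++ '\n' :: B', by rw [pvPre_cons, hP'] at *; rw [hB']; simp⟩

-- C2: last newline before the occurrence
theorem pvRfind_take (P : List (List Char)) (tv : List Char) (htv : '\n' ∉ tv) :
    PySem.Chars.rfind (pvPre P ++ tv) ['\n']
      = (if P = [] then (-1 : Int) else ((pvPre P).length : Int) - 1) := by
  cases hP : P with
  | nil =>
    rw [if_pos rfl]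
    rw [PySem.Chars.rfind]
    apply pvRfind_go_neg
    intro m _ hpre
    simp only [pvPre_nil, List.nil_append] at hpre
    exact pvSingle_no_prefix _ (fun hm => htv ((List.drop_subset _ _) hm)) hpre
  | cons q P' =>
    simp only [reduceCtorEq, if_false]
    obtain ⟨B, hB⟩ := pvPre_concat (q :: P') (by simp)
    rw [← hP] at hB ⊢
    rw [hB]
    have hlen : (pvPre P).length = B.length + 1 := by rw [hB]; simp
    rw [PySem.Chars.rfind]
    have : (B ++ ['\n']) ++ tv = B ++ '\n' :: tv := by simp
    rw [this]
    have hgo := pvRfind_go_eq (B ++ '\n' :: tv) ['\n'] B.length (B ++ '\n' :: tv).length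
      (by simp)
      (by rw [List.drop_append_of_le_length (le_refl _)]; simp)
      (by
        intro m hm1 hm2 hpre
        rw [List.drop_append] at hpre
        rw [List.drop_of_length_le (by omega)] at hpre
        have hm3 : m - B.length = (m - B.length - 1) + 1 := by omega
        rw [hm3, List.nil_append, List.drop_succ_cons] at hpre
        exact pvSingle_no_prefix _ (fun hmem => htv ((List.drop_subset _ _) hmem)) hpre)
    rw [hgo]
    simp

-- C3: first newline at or after the occurrence
theorem pvFind_drop (S : List (List Char)) (dv : List Char) (hdv : '\n' ∉ dv) :
    PySem.Chars.find (dv ++ (S.map (fun r => '\n' :: r)).flatten) ['\n']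
      = (if S = [] then (-1 : Int) else (dv.length : Int)) := by
  cases hS : S with
  | nil =>
    rw [if_pos rfl]
    simp only [List.map_nil, List.flatten_nil, List.append_nil]
    rw [PySem.Chars.find_eq_neg_one_iff]
    intro hinf
    exact hdv (hinf.subset (by simp))
  | cons r rs =>
    simp only [reduceCtorEq, if_false, List.map_cons, List.flatten_cons]
    have : dv ++ ('\n' :: r ++ (rs.map (fun r => '\n' :: r)).flatten)
        = dv ++ '\n' :: (r ++ (rs.map (fun r => '\n' :: r)).flatten) := by simp
    rw [this]
    rw [pvFind_eq_of (dv ++ '\n' :: (r ++ (rs.map (fun r => '\n' :: r)).flatten)) ['\n'] dv.length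
      (by rw [List.drop_append_of_le_length (le_refl _)]; simp)
      (fun j hj => pvNoNl_no_prefix dv _ hdv j hj)]


theorem pvJoin_empty (L : List (List Char)) : PySem.Chars.join [] L = L.flatten := by
  induction L with
  | nil => simp [PySem.Chars.join_nil]
  | cons x rest ih =>
    cases rest with
    | nil => simp [PySem.Chars.join_singleton]
    | cons y ys => rw [PySem.Chars.join_cons_cons]; simp at ih ⊢; simpa using ih

theorem pvPre_eq_join (P : List (List Char)) (h : P ≠ []) :
    pvPre P = PySem.Chars.join ['\n'] P ++ ['\n'] := by
  induction P with
  | nil => exact absurd rfl h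
  | cons q P' ih =>
    cases hP' : P' with
    | nil => simp [pvPre_cons, pvPre_nil, PySem.Chars.join_singleton]
    | cons r rs =>
      have hih := ih (by simp [hP'])
      rw [hP'] at hih
      rw [pvPre_cons, hih, PySem.Chars.join_cons_cons]
      simp

theorem pvPre_eq_nil_iff (P : List (List Char)) : pvPre P = [] ↔ P = [] := by
  cases P with
  | nil => simp [pvPre_nil]
  | cons q P' => simp [pvPre_cons]

theorem pvFlat_eq (R : List (List Char)) :
    (R.map (fun r => '\n' :: r)).flatten
      = if R = [] then [] else '\n' :: PySem.Chars.join ['\n'] R := by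
  cases R with
  | nil => simp
  | cons r rs => rw [if_neg (by simp), pvJoin_cons]; simp

theorem pvAssemble (v lc : List Char) (D R : List (List Char)) :
    PySem.Chars.join ['\n'] (v :: (D ++ lc :: R))
      = v ++ (D.map (fun d => '\n' :: d)).flatten ++ '\n' :: lc
          ++ (R.map (fun r => '\n' :: r)).flatten := by
  rw [pvJoin_cons]
  simp

theorem pvRemove (A B : List String) (V : String) (hA : V ∉ A) :
    PySem.List.remove? (A ++ V :: B) V = some (A ++ B) := by
  induction A with
  | nil =>
    simp only [List.nil_append]
    rw [PySem.List.remove?, List.idxOf?_cons]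
    simp
  | cons a A' ih =>
    have hne : a ≠ V := fun h => hA (h ▸ List.mem_cons_self)
    rw [List.cons_append, PySem.List.remove?_cons_of_ne _ hne,
      ih (fun h => hA (List.mem_cons_of_mem _ h))]
    simp

theorem pvRfindFrom_eval (l sub : List Char) (i : Int) (h0 : 0 ≤ i) (hn : i ≤ (l.length : Int)) :
    PySem.Chars.rfindFrom l sub 0 (some i)
      = (if PySem.Chars.rfind (List.take i.toNat l) sub = -1 then -1
         else PySem.Chars.rfind (List.take i.toNat l) sub) := by
  rw [PySem.Chars.rfindFrom]
  simp only
  rw [if_neg (by omega)]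
  split_ifs <;> (try simp_all [Int.toNat_zero, List.drop_zero]) <;> omega

theorem pvFinal (v lc : List Char) (D R : List (List Char)) :
    PySem.Chars.join ['\n'] ([v] ++ D ++ [lc] ++ R)
      = v ++ PySem.Chars.join [] (D.map (fun d => '\n' :: d)) ++ ('\n' :: lc)
          ++ (R.map (fun r => '\n' :: r)).flatten := by
  rw [pvJoin_empty]
  have hsh : [v] ++ D ++ [lc] ++ R = v :: (D ++ lc :: R) := by simp
  rw [hsh, pvAssemble]

-- ===== VERDICT (by name: the statement is the Claim_ definition above) =====
theorem add_shader_defines_py_spec : Claim_equal_add_shader_defines_py := by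
  intro s defines _ hpre
  unfold Spec_add_shader_defines_py
  -- the split is always some (nonempty separator)
  have hsplit : PySem.Str.split? s "\n"
      = some ((PySem.Chars.splitOn s.toList ['\n']).map String.ofList) := by
    rw [PySem.Str.split?, PySem.Chars.split?]; simp
  have hlines : (PySem.Str.split? s "\n").getD [] = (pvSplit s.toList).map String.ofList := by
    rw [hsplit, Option.getD_some, pvSplitOn_eq]
  -- the first matching line exists
  have hfound : ∃ V, ((pvSplit s.toList).map String.ofList).find?
      (fun line => PySem.Str.isIn "#version" line) = some V := by
    obtain ⟨line, hmem, hin⟩ := hpre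
    rw [hlines] at hmem
    exact Option.isSome_iff_exists.mp (List.find?_isSome.mpr ⟨line, hmem, hin⟩)
  obtain ⟨V, hV⟩ := hfound
  obtain ⟨hVp, Pstr, Sstr, hLeq, hPneg⟩ := List.find?_eq_some_iff_append.mp hV
  -- char-level data
  have hMap : pvSplit s.toList = Pstr.map String.toList ++ V.toList :: Sstr.map String.toList := by
    have := congrArg (List.map String.toList) hLeq
    rw [List.map_map] at this
    simp only [List.map_append, List.map_cons] at this
    rw [← this]
    have hco : (String.toList ∘ String.ofList) = id := by funext l; simp [String.toList_ofList]
    rw [hco, List.map_id]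
  set P := Pstr.map String.toList with hPdef
  set v := V.toList with hvdef
  set S := Sstr.map String.toList with hSdef
  have hs_eq : s.toList = pvPre P ++ PySem.Chars.join ['\n'] (v :: S) := by
    conv_lhs => rw [← pvJoin_pvSplit s.toList]
    rw [hMap, pvJoin_split _ _ (by simp)]
  -- newline-freeness of every line
  have hfree := pvSplit_nl_free s.toList
  rw [hMap] at hfree
  have hv_free : '\n' ∉ v := hfree v (by simp)
  have hP_free : ∀ l ∈ P, '\n' ∉ l := fun l hl => hfree l (by simp [hl])
  have hS_free : ∀ l ∈ S, '\n' ∉ l := fun l hl => hfree l (by simp [hl])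
  -- pattern facts
  have hpat_free : '\n' ∉ ("#version".toList) := by decide
  have hpat_inf : "#version".toList <:+: v := by
    rw [PySem.Str.isIn] at hVp
    exact (PySem.Chars.isIn_iff_infix _ _).mp hVp
  have hP_pat : ∀ l ∈ P, ¬ "#version".toList <:+: l := by
    intro l hl hinf
    obtain ⟨a, ha, rfl⟩ := List.mem_map.mp hl
    have hthis := hPneg a ha
    rw [PySem.Str.isIn] at hthis
    have h2 : PySem.Chars.isIn "#version".toList a.toList = true :=
      (PySem.Chars.isIn_iff_infix _ _).mpr hinf
    rw [h2] at hthis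
    simp at hthis
  -- the first occurrence position
  have hfv_nn : 0 ≤ PySem.Chars.find v "#version".toList :=
    (PySem.Chars.find_nonneg_iff _ _).mpr hpat_inf
  set fv := (PySem.Chars.find v "#version".toList).toNat with hfvdef
  have hfv_le : fv ≤ v.length := by
    have := PySem.Chars.find_le_length v "#version".toList
    omega
  have hw_eq : PySem.Chars.join ['\n'] (v :: S) = v ++ (S.map (fun r => '\n' :: r)).flatten :=
    pvJoin_cons v S
  have hlen_s : s.toList.length = (pvPre P).length + v.length
      + ((S.map (fun r => '\n' :: r)).flatten).length := by
    rw [hs_eq, hw_eq]; simp; omega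
  have hi : PySem.Str.find s "#version" = (((pvPre P).length + fv : Nat) : Int) := by
    rw [PySem.Str.find_eq]
    conv_lhs => rw [hs_eq]
    exact pvFind_s P S v "#version".toList hpat_free hpat_inf hP_pat
  -- start = length of the pre part
  have htake : List.take ((pvPre P).length + fv) s.toList = pvPre P ++ List.take fv v := by
    rw [hs_eq, List.take_append]
    congr 1
    · rw [List.take_of_length_le (by omega)]
    · rw [hw_eq]
      have : (pvPre P).length + fv - (pvPre P).length = fv := by omega
      rw [this, List.take_append_of_le_length hfv_le]
  have hstart : PySem.Str.rfindFrom s "\n" 0 (some (((pvPre P).length + fv : Nat) : Int)) + 1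
      = (((pvPre P).length : Nat) : Int) := by
    rw [PySem.Str.rfindFrom_eq]
    have hnl : ("\n" : String).toList = ['\n'] := rfl
    rw [hnl]
    rw [pvRfindFrom_eval _ _ _ (by omega) (by rw [hlen_s]; push_cast; omega)]
    rw [Int.toNat_natCast, htake]
    rw [pvRfind_take P (List.take fv v)
      (fun hm => hv_free ((List.take_subset _ _) hm))]
    by_cases hP0 : P = []
    · rw [if_pos hP0, if_pos rfl, hP0, pvPre_nil]
      simp
    · rw [if_neg hP0]
      have hppos : 0 < (pvPre P).length := by
        rcases List.length_pos_iff.mpr ((not_iff_not.mpr (pvPre_eq_nil_iff P)).mpr hP0) with h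
        exact h
      rw [if_neg (by omega)]
      omega
  -- first newline after the occurrence
  have hdrop : List.drop ((pvPre P).length + fv) s.toList
      = List.drop fv v ++ (S.map (fun r => '\n' :: r)).flatten := by
    rw [hs_eq, List.drop_append]
    rw [List.drop_of_length_le (by omega), List.nil_append]
    have : (pvPre P).length + fv - (pvPre P).length = fv := by omega
    rw [this, hw_eq, List.drop_append_of_le_length hfv_le]
  have hendi : PySem.Str.findFrom s "\n" (((pvPre P).length + fv : Nat) : Int)
      = (if S = [] then (-1 : Int) else (((pvPre P).length + v.length : Nat) : Int)) := by
    rw [PySem.Str.findFrom_eq]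
    have hnl : ("\n" : String).toList = ['\n'] := rfl
    rw [hnl]
    rw [PySem.Chars.findFrom_natCast s.toList ['\n'] ((pvPre P).length + fv) (by omega)]
    rw [hdrop, pvFind_drop S (List.drop fv v) (fun hm => hv_free ((List.drop_subset _ _) hm))]
    by_cases hS0 : S = []
    · rw [if_pos hS0, if_pos rfl, if_pos hS0]
    · rw [if_neg hS0, if_neg hS0, if_neg (by omega)]
      rw [List.length_drop]
      push_cast
      omega
  -- A's list.remove removes exactly the matched line
  have hVnotP : V ∉ Pstr := by
    intro hmem
    have := hPneg V hmem
    rw [hVp] at this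
    simp at this
  have hremove : PySem.List.remove? ((pvSplit s.toList).map String.ofList) V
      = some (Pstr ++ Sstr) := by
    rw [hLeq]
    exact pvRemove Pstr Sstr V hVnotP
  -- evaluate port A
  have hA : add_shader_defines_py s defines
      = PySem.Str.join "\n" ([V] ++ ((PySem.Dict.ofList defines).items.map
          (fun p => "#define " ++ p.1 ++ " " ++ p.2)) ++ ["#line 1"] ++ (Pstr ++ Sstr)) := by
    unfold add_shader_defines_py
    simp only [hlines, hV, hremove, Option.getD_some]
  rw [hA]
  -- evaluate port B
  unfold add_shader_defines_py_alt
  simp only [hi]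
  rw [if_neg (by omega)]
  simp only [hstart, hendi]
  by_cases hS0 : S = []
  case pos =>
    rw [if_pos hS0]
    have hSstr0 : Sstr = [] := by
      rcases Sstr with _ | ⟨a, as⟩
      · rfl
      · simp [hSdef] at hS0
    rw [if_pos (show (-1 : Int) < 0 by decide)]
    -- identify the slices
    have hs_eq' : s.toList = pvPre P ++ v := by
      rw [hs_eq, hw_eq, hS0]; simp
    have hslice1 : (PySem.Str.slice s (some (((pvPre P).length : Nat) : Int))).toList = v := by
      rw [PySem.Str.toList_slice]
      simp only [PySem.Chars.slice_eq_listSlice]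
      rw [PySem.List.slice_from _ (by omega), Int.toNat_natCast, hs_eq', List.drop_left]
    apply String.toList_inj.mp
    have hdefs : List.map (String.toList ∘ fun p => "\n#define " ++ p.1 ++ " " ++ p.2)
        (PySem.Dict.ofList defines).items
      = (List.map (String.toList ∘ fun p => "#define " ++ p.1 ++ " " ++ p.2)
          (PySem.Dict.ofList defines).items).map (fun d => '\n' :: d) := by
      rw [List.map_map]
      apply List.map_congr_left
      intro p _
      simp only [Function.comp_apply, String.toList_append]
      rfl
    by_cases hP0 : P = []
    · have hPstr0 : Pstr = [] := by
        rcases Pstr with _ | ⟨a, as⟩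
        · rfl
        · simp [hPdef] at hP0
      rw [if_pos (by rw [hP0, pvPre_nil]; rfl)]
      rw [hPstr0, hSstr0]
      simp only [PySem.Str.toList_join, String.toList_append, hslice1]
      rw [show (("\n" : String).toList) = ['\n'] from rfl]
      simp only [List.map_append, List.map_cons, List.map_nil, List.map_map, List.append_nil]
      have hfin := pvFinal V.toList ("#line 1".toList)
        (List.map (String.toList ∘ fun p => "#define " ++ p.1 ++ " " ++ p.2)
          (PySem.Dict.ofList defines).items) []
      simp only [List.map_nil, List.flatten_nil, List.append_nil] at hfin
      rw [hfin]
      simp [hdefs, hvdef, show (("\n#line 1" : String).toList) = '\n' :: ("#line 1").toList from rfl,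
        show (("" : String).toList) = ([] : List Char) from rfl]
    · -- P nonempty: the tail keeps the earlier lines
      rw [if_neg (by
        intro h0
        exact hP0 ((pvPre_eq_nil_iff P).mp (List.length_eq_zero_iff.mp (by exact_mod_cast h0))))]
      have hslice2 : (PySem.Str.slice s none (some ((((pvPre P).length : Nat) : Int) - 1))).toList
          = PySem.Chars.join ['\n'] P := by
        rw [PySem.Str.toList_slice]
        simp only [PySem.Chars.slice_eq_listSlice]
        have hplen : 0 < (pvPre P).length :=
          List.length_pos_iff.mpr (fun h => hP0 ((pvPre_eq_nil_iff P).mp h))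
        rw [PySem.List.slice_to _ (by omega)]
        have ht : (((pvPre P).length : Int) - 1).toNat = (pvPre P).length - 1 := by omega
        rw [ht, hs_eq', pvPre_eq_join P hP0]
        rw [show PySem.Chars.join ['\n'] P ++ ['\n'] ++ v
            = PySem.Chars.join ['\n'] P ++ ('\n' :: v) from by simp]
        rw [show (PySem.Chars.join ['\n'] P ++ ['\n']).length - 1
            = (PySem.Chars.join ['\n'] P).length from by simp]
        exact List.take_left
      rw [hSstr0]
      simp only [PySem.Str.toList_join, String.toList_append, hslice1, hslice2]
      rw [show (("\n" : String).toList) = ['\n'] from rfl]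
      simp only [List.map_append, List.map_cons, List.map_nil, List.map_map, List.append_nil]
      rw [pvFinal]
      rw [pvFlat_eq P, if_neg hP0]
      simp [hdefs, hvdef, show (("\n#line 1" : String).toList) = '\n' :: ("#line 1").toList from rfl]
  case neg =>
    rw [if_neg hS0]
    have hplus : (((pvPre P).length + v.length : Nat) : Int) ≥ 0 := by omega
    rw [if_neg (by omega)]
    have hSne : (S.map (fun r => '\n' :: r)).flatten = '\n' :: PySem.Chars.join ['\n'] S := by
      rw [pvFlat_eq S, if_neg hS0]
    -- the three slices
    have hslice1 : (PySem.Str.slice s (some (((pvPre P).length : Nat) : Int))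
        (some (((pvPre P).length + v.length : Nat) : Int))).toList = v := by
      rw [PySem.Str.toList_slice]
      simp only [PySem.Chars.slice_eq_listSlice]
      rw [PySem.List.slice_natCast]
      have : (pvPre P).length + v.length - (pvPre P).length = v.length := by omega
      rw [this, hs_eq, List.drop_left, hw_eq, List.take_left]
    have hslice2 : (PySem.Str.slice s none (some (((pvPre P).length : Nat) : Int))).toList
        = pvPre P := by
      rw [PySem.Str.toList_slice]
      simp only [PySem.Chars.slice_eq_listSlice]
      rw [PySem.List.slice_to _ (by omega), Int.toNat_natCast, hs_eq, List.take_left]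
    have hslice3 : (PySem.Str.slice s (some ((((pvPre P).length + v.length : Nat) : Int) + 1))).toList
        = PySem.Chars.join ['\n'] S := by
      rw [PySem.Str.toList_slice]
      simp only [PySem.Chars.slice_eq_listSlice]
      rw [show ((((pvPre P).length + v.length : Nat) : Int) + 1)
          = (((pvPre P).length + v.length + 1 : Nat) : Int) from by push_cast; ring]
      rw [PySem.List.slice_from _ (by omega), Int.toNat_natCast]
      rw [hs_eq, hw_eq, hSne]
      rw [show pvPre P ++ (v ++ '\n' :: PySem.Chars.join ['\n'] S)
          = (pvPre P ++ v ++ ['\n']) ++ PySem.Chars.join ['\n'] S from by simp]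
      rw [show (pvPre P).length + v.length + 1 = (pvPre P ++ v ++ ['\n']).length from by simp; omega]
      exact List.drop_left
    apply String.toList_inj.mp
    have hdefs : List.map (String.toList ∘ fun p => "\n#define " ++ p.1 ++ " " ++ p.2)
        (PySem.Dict.ofList defines).items
      = (List.map (String.toList ∘ fun p => "#define " ++ p.1 ++ " " ++ p.2)
          (PySem.Dict.ofList defines).items).map (fun d => '\n' :: d) := by
      rw [List.map_map]
      apply List.map_congr_left
      intro p _
      simp only [Function.comp_apply, String.toList_append]
      rfl
    simp only [PySem.Str.toList_join, String.toList_append, hslice1, hslice2, hslice3]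
    rw [show (("\n" : String).toList) = ['\n'] from rfl]
    simp only [List.map_append, List.map_cons, List.map_nil, List.map_map]
    rw [pvFinal]
    rw [pvFlat_eq (P ++ S), if_neg (by simp [hS0])]
    rw [pvJoin_split P S hS0]
    simp [hdefs, hvdef, show (("\n#line 1" : String).toList) = '\n' :: ("#line 1").toList from rfl]
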